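-- pv_equiv track=rewrite | github.com/breinbaas/breinbaas.github.io | code/02.geometry.py | combine_layers
-- ===== SOURCE A (Python) =====
-- from itertools import chain
--
-- def combine_layers(layers_left, layers_right, xleft, xmid, xright):
--     result = []
--     z_combined = sorted(list(set(chain(*[[l[0], l[1]] for l in layers_left + layers_right]))), reverse=True)
--
--     for layer in layers_left:
--         coords = []
--         coords.append((xleft, layer[1])) # bottomleft
--         coords.append((xleft, layer[0])) # topleft
--         coords.append((xmid, layer[0])) # topright
--
--         z_extras = [z for z in z_combined if z < layer[0] and z > layer[1]]
--         for z in z_extras: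
--             coords.append((xmid, z))
--
--         coords.append((xmid, layer[1])) # bottomright
--         result.append((layer[2], coords))
--
--     for layer in layers_right:
--         coords = []
--         coords.append((xmid, layer[1])) # bottomleft
--
--         z_extras = [z for z in z_combined if z < layer[0] and z > layer[1]]
--         for z in reversed(z_extras):
--             coords.append((xmid, z))
--
--         coords.append((xmid, layer[0])) # topleft
--         coords.append((xright, layer[0])) # topright
--         coords.append((xright, layer[1])) # bottomright
--         result.append((layer[2], coords))
--
--     return result
-- ===== SOURCE B (Python) =====
-- from bisect import bisect_left, bisect_right
--
-- def combine_layers(layers_left, layers_right, xleft, xmid, xright):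
--     zs = sorted({z for l in layers_left + layers_right for z in (l[0], l[1])})
--
--     def extras(top, bot):
--         # ascending run of distinct z values strictly between bot and top
--         return zs[bisect_right(zs, bot):bisect_left(zs, top)]
--
--     result = [(name,
--                [(xleft, bot), (xleft, top), (xmid, top)]
--                + [(xmid, z) for z in reversed(extras(top, bot))]
--                + [(xmid, bot)])
--               for top, bot, name in layers_left]
--     result += [(name,
--                 [(xmid, bot)]
--                 + [(xmid, z) for z in extras(top, bot)]
--                 + [(xmid, top), (xright, top), (xright, bot)])
--                for top, bot, name in layers_right]
--     return result
-- ===== Notes on version B (the rewrite author's own statement) =====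
-- stated objective: faster
-- what changed: B sorts the distinct z values ascending once and binary-searches (bisect) the contiguous strictly-between slice per layer, building each polygon by list concatenation, instead of A's full linear rescan of z_combined for every layer.
import Mathlib
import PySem

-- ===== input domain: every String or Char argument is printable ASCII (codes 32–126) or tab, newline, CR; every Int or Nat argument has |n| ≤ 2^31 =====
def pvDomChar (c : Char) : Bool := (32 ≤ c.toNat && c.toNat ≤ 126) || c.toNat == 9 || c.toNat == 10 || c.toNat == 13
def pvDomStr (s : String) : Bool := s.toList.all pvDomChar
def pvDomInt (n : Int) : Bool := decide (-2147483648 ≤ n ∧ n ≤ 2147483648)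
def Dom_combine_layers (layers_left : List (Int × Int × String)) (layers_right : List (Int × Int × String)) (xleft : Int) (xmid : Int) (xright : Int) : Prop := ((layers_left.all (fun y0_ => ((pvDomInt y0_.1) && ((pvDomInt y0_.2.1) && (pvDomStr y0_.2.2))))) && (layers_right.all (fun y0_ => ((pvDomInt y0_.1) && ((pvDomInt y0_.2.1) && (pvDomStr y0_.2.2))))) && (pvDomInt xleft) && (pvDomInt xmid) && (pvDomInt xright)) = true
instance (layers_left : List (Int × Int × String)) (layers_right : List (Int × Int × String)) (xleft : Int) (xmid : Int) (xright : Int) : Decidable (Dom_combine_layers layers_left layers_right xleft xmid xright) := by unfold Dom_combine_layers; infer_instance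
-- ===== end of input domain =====

-- B replaces A's per-layer linear rescan of z_combined by one ascending sort plus a bisect slice per layer (objective: faster).

-- ===== PORT A =====
def combine_layers (layers_left : List (Int × Int × String)) (layers_right : List (Int × Int × String)) (xleft : Int) (xmid : Int) (xright : Int) : List (String × (List (Int × Int))) :=
  let z_combined : List Int :=
    PySem.List.sorted (PySem.Set.ofList ((layers_left ++ layers_right).flatMap (fun l => [l.1, l.2.1]))) (fun z => z) true
  let result : List (String × (List (Int × Int))) :=
    layers_left.foldl (fun result layer =>
      let coords : List (Int × Int) := [] ++ [(xleft, layer.2.1)] ++ [(xleft, layer.1)] ++ [(xmid, layer.1)]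
      let z_extras := z_combined.filter (fun z => decide (z < layer.1) && decide (z > layer.2.1))
      let coords := z_extras.foldl (fun coords z => coords ++ [(xmid, z)]) coords
      let coords := coords ++ [(xmid, layer.2.1)]
      result ++ [(layer.2.2, coords)]) []
  layers_right.foldl (fun result layer =>
    let coords : List (Int × Int) := [] ++ [(xmid, layer.2.1)]
    let z_extras := z_combined.filter (fun z => decide (z < layer.1) && decide (z > layer.2.1))
    let coords := z_extras.reverse.foldl (fun coords z => coords ++ [(xmid, z)]) coords
    let coords := coords ++ [(xmid, layer.1)] ++ [(xright, layer.1)] ++ [(xright, layer.2.1)]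
    result ++ [(layer.2.2, coords)]) result

-- ===== PORT B =====
-- zs[bisect_right(zs, bot):bisect_left(zs, top)]
def pvExtras (zs : List Int) (top bot : Int) : List Int :=
  PySem.List.slice zs (some ((PySem.List.bisectRight zs bot : Nat) : Int)) (some ((PySem.List.bisectLeft zs top : Nat) : Int))

def combine_layers_alt (layers_left : List (Int × Int × String)) (layers_right : List (Int × Int × String)) (xleft : Int) (xmid : Int) (xright : Int) : List (String × (List (Int × Int))) :=
  let zs : List Int :=
    PySem.List.sorted (PySem.Set.ofList ((layers_left ++ layers_right).flatMap (fun l => [l.1, l.2.1]))) (fun z => z)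
  let result := layers_left.map (fun l =>
    (l.2.2, [(xleft, l.2.1), (xleft, l.1), (xmid, l.1)]
            ++ (pvExtras zs l.1 l.2.1).reverse.map (fun z => (xmid, z))
            ++ [(xmid, l.2.1)]))
  result ++ layers_right.map (fun l =>
    (l.2.2, [(xmid, l.2.1)]
            ++ (pvExtras zs l.1 l.2.1).map (fun z => (xmid, z))
            ++ [(xmid, l.1), (xright, l.1), (xright, l.2.1)]))

-- ===== PRECONDITION & SPEC =====
def Spec_combine_layers (layers_left : List (Int × Int × String)) (layers_right : List (Int × Int × String)) (xleft : Int) (xmid : Int) (xright : Int) (out : List (String × (List (Int × Int)))) : Prop := out = combine_layers_alt layers_left layers_right xleft xmid xright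
instance (layers_left : List (Int × Int × String)) (layers_right : List (Int × Int × String)) (xleft : Int) (xmid : Int) (xright : Int) (out : List (String × (List (Int × Int)))) : Decidable (Spec_combine_layers layers_left layers_right xleft xmid xright out) := by unfold Spec_combine_layers; infer_instance

-- ===== CLAIM (what is proved, stated in full; the proofs are below) =====
def Claim_equal_combine_layers : Prop := ∀ (layers_left : List (Int × Int × String)) (layers_right : List (Int × Int × String)) (xleft : Int) (xmid : Int) (xright : Int), Dom_combine_layers layers_left layers_right xleft xmid xright → Spec_combine_layers layers_left layers_right xleft xmid xright (combine_layers layers_left layers_right xleft xmid xright)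

-- ===== LEMMAS AND PROOFS =====

-- A filter whose truth on the j-th element is exactly 'lo ≤ j < hi' is the slice [lo:hi].
theorem pv_filter_eq_drop_take : ∀ (zs : List Int) (p : Int → Bool) (lo hi : Nat),
    (∀ (j : Nat) (hj : j < zs.length), p zs[j] = decide (lo ≤ j ∧ j < hi)) →
    zs.filter p = (zs.drop lo).take (hi - lo) := by
  intro zs
  induction zs with
  | nil => simp
  | cons a t ih =>
    intro p lo hi h
    have ht : ∀ (j : Nat) (hj : j < t.length), p t[j] = decide (lo - 1 ≤ j ∧ j < hi - 1) := by
      intro j hj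
      have := h (j + 1) (by simpa using Nat.succ_lt_succ hj)
      simp only [List.getElem_cons_succ] at this
      rw [this, decide_eq_decide]
      omega
    have ha : p a = decide (lo ≤ 0 ∧ 0 < hi) := by
      have := h 0 (by simp)
      simpa using this
    cases lo with
    | zero =>
      cases hi with
      | zero =>
        have hpa : p a = false := by simpa using ha
        have := ih p 0 0 (by simpa using ht)
        simp [hpa, this]
      | succ k =>
        have hpa : p a = true := by simpa using ha
        have := ih p 0 k (by simpa using ht)
        simp [hpa, this]
    | succ m =>
      have hpa : p a = false := by simpa using ha
      have := ih p m (hi - 1) (by simpa using ht)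
      have hs : hi - (m + 1) = hi - 1 - m := by omega
      simp [hpa, this, hs]

-- On a strictly increasing list, A's strictly-between filter is B's bisect slice.
theorem pv_extras_eq_filter (zs : List Int) (hp : zs.Pairwise (· < ·)) (top bot : Int) :
    zs.filter (fun z => decide (z < top) && decide (z > bot)) = pvExtras zs top bot := by
  have hple : zs.Pairwise (· ≤ ·) := hp.imp le_of_lt
  obtain ⟨hlo_le, hlo1, hlo2⟩ := PySem.List.bisectRight_spec zs bot hple
  obtain ⟨hhi_le, hhi1, hhi2⟩ := PySem.List.bisectLeft_spec zs top hple
  rw [pvExtras, PySem.List.slice_natCast]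
  apply pv_filter_eq_drop_take
  intro j hj
  rw [Bool.eq_iff_iff]
  simp only [Bool.and_eq_true, decide_eq_true_eq, gt_iff_lt]
  constructor
  · rintro ⟨h1, h2⟩
    constructor
    · by_contra hc
      exact absurd h2 (not_lt.mpr (hlo1 j hj (by omega)))
    · by_contra hc
      exact absurd h1 (not_lt.mpr (hhi2 j hj (by omega)))
  · rintro ⟨h1, h2⟩
    exact ⟨hhi1 j hj h2, hlo2 j hj h1⟩

-- sorted(set(xs), reverse=True) is the reverse of sorted(set(xs)).
theorem pv_sorted_rev_eq_reverse (xs : List Int) :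
    PySem.List.sorted (PySem.Set.ofList xs) (fun z => z) true
      = (PySem.List.sorted (PySem.Set.ofList xs) (fun z => z) false).reverse := by
  apply PySem.List.sorted_rev_eq_of_perm_of_pairwise_gt
  · exact (List.reverse_perm _).trans (PySem.List.sorted_perm _ _ _)
  · exact List.pairwise_reverse.mpr (PySem.List.sorted_ofList_pairwise_lt xs)

-- ===== VERDICT (by name: the statement is the Claim_ definition above) =====
theorem combine_layers_spec : Claim_equal_combine_layers := by
  intro ll lr xl xm xr _
  unfold Spec_combine_layers
  have hext : ∀ top bot,
      (PySem.List.sorted (PySem.Set.ofList ((ll ++ lr).flatMap (fun l => [l.1, l.2.1]))) (fun z => z) false).filter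
        (fun z => decide (z < top) && decide (z > bot))
      = pvExtras (PySem.List.sorted (PySem.Set.ofList ((ll ++ lr).flatMap (fun l => [l.1, l.2.1]))) (fun z => z) false) top bot :=
    fun top bot => pv_extras_eq_filter _ (PySem.List.sorted_ofList_pairwise_lt _) top bot
  simp only [combine_layers, combine_layers_alt, pv_sorted_rev_eq_reverse, List.filter_reverse,
    PySem.List.foldl_append_singleton_eq_map, List.reverse_reverse, List.nil_append,
    hext]
  simp [List.append_assoc]
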